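-- pv_equiv track=rewrite | github.com/haasonsaas/jarvis | src/jarvis/tools/services_defaults.py | _contains_phone_like
-- ===== SOURCE A (Python) =====
-- def _contains_phone_like(text: str) -> bool:
--     sample = str(text or "")
--     current_digits = 0
--     for ch in sample + " ":
--         if ch.isdigit():
--             current_digits += 1
--             continue
--         if ch in {" ", "-", ".", "(", ")", "+"}:
--             continue
--         if current_digits in {10, 11}:
--             return True
--         current_digits = 0
--     return current_digits in {10, 11}
-- ===== SOURCE B (Python) =====
-- def _contains_phone_like(text: str) -> bool:
--     sample = str(text or "")
--     # Map each char: digits kept, separators dropped, anything else becomes a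
--     # run delimiter; then split into runs and test each run's digit count.
--     cleaned = "".join(
--         c if c.isdigit() else ("" if c in " -.()+" else "\x00")
--         for c in sample
--     )
--     return any(len(run) in (10, 11) for run in cleaned.split("\x00"))
-- ===== Notes on version B (the rewrite author's own statement) =====
-- stated objective: simpler
-- what changed: Replaces the sentinel-append loop that threads a digit counter with early return by a map-then-split decomposition: keep digits, drop separators, turn other characters into delimiters, split into runs and test each run's length.
import Mathlib
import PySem

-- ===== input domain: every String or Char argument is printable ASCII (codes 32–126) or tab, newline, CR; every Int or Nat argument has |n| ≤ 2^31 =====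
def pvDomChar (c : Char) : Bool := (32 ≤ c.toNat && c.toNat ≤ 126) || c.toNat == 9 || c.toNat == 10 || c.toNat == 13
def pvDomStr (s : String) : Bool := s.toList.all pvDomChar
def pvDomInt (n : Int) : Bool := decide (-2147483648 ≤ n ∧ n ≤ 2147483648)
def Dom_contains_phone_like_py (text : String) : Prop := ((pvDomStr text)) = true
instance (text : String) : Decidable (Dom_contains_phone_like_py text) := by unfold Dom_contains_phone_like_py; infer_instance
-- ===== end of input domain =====

-- B replaces A's sentinel-append counter loop with a map-then-split decomposition (objective: simpler).

-- ===== PORT A =====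
-- ch in {" ", "-", ".", "(", ")", "+"}
def pvIsSepA (ch : Char) : Bool :=
  ch == ' ' || ch == '-' || ch == '.' || ch == '(' || ch == ')' || ch == '+'

-- the for-loop over sample + " " with early return; final `return current_digits in {10, 11}`
def pvALoop : List Char → Int → Bool
  | [], cur => cur == 10 || cur == 11
  | ch :: rest, cur =>
    if PySem.Chars.isdigit ch then pvALoop rest (cur + 1)
    else if pvIsSepA ch then pvALoop rest cur
    else if cur == 10 || cur == 11 then true
    else pvALoop rest 0

def contains_phone_like_py (text : String) : Bool :=
  pvALoop (text.toList ++ [' ']) 0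

-- ===== PORT B =====
-- c if c.isdigit() else ("" if c in " -.()+" else "\x00")
def pvCleanB (c : Char) : List Char :=
  if PySem.Chars.isdigit c then [c]
  else if (" -.()+".toList).contains c then []
  else ['\x00']

-- hand port of Python str.split with a ONE-CHARACTER separator (exact: non-collapsing, [""] on "")
def pvSplitChar (d : Char) : List Char → List (List Char)
  | [] => [[]]
  | c :: rest =>
    if c == d then [] :: pvSplitChar d rest
    else
      match pvSplitChar d rest with
      | [] => [[c]]
      | r :: rs => (c :: r) :: rs

-- len(run) in (10, 11)
def pvRunOk (run : List Char) : Bool := run.length == 10 || run.length == 11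

def contains_phone_like_py_alt (text : String) : Bool :=
  let cleaned := text.toList.flatMap pvCleanB
  (pvSplitChar '\x00' cleaned).any pvRunOk

-- ===== PRECONDITION & SPEC =====
def Spec_contains_phone_like_py (text : String) (out : Bool) : Prop := out = contains_phone_like_py_alt text
instance (text : String) (out : Bool) : Decidable (Spec_contains_phone_like_py text out) := by unfold Spec_contains_phone_like_py; infer_instance

-- ===== CLAIM (what is proved, stated in full; the proofs are below) =====
def Claim_equal_contains_phone_like_py : Prop := ∀ (text : String), Dom_contains_phone_like_py text → Spec_contains_phone_like_py text (contains_phone_like_py text)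

-- ===== LEMMAS AND PROOFS =====

theorem pvSplitChar_ne_nil (d : Char) (l : List Char) : pvSplitChar d l ≠ [] := by
  cases l with
  | nil => simp [pvSplitChar]
  | cons c rest =>
    simp only [pvSplitChar]
    split
    · simp
    · cases h : pvSplitChar d rest <;> simp

theorem pvIsdigit_ne_delim (c : Char) (h : PySem.Chars.isdigit c = true) : (c == '\x00') = false := by
  simp only [PySem.Chars.isdigit, Bool.and_eq_true, decide_eq_true_eq] at h
  have := h.1
  simp only [beq_eq_false_iff_ne, ne_eq]
  intro hc; subst hc
  exact absurd this (by decide)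

-- the two separator tests agree
theorem pvSep_eq (c : Char) : (" -.()+".toList).contains c = pvIsSepA c := by
  have h : " -.()+".toList = [' ', '-', '.', '(', ')', '+'] := rfl
  rw [h, pvIsSepA]
  simp only [List.contains_cons, List.contains_nil, Bool.or_false, Bool.or_assoc]

-- the counter test on a cast Nat equals B's run-length test
theorem pvOkCast (n : Nat) : (((n : Int) == 10) || ((n : Int) == 11)) = ((n == 10) || (n == 11)) := by
  rw [Bool.eq_iff_iff]
  simp only [Bool.or_eq_true, beq_iff_eq]
  constructor <;> intro h <;> omega

-- main invariant: the counter loop equals "digit count of first run (plus carry) or some later run is ok"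
theorem pvMain (l : List Char) : ∀ (cur : Int),
    pvALoop l cur =
      match pvSplitChar '\x00' (l.flatMap pvCleanB) with
      | [] => false
      | r :: rs => ((cur + r.length == 10 || cur + r.length == 11) || rs.any pvRunOk) := by
  induction l with
  | nil =>
    intro cur
    simp [pvALoop, pvSplitChar]
  | cons c rest ih =>
    intro cur
    simp only [List.flatMap_cons]
    by_cases hd : PySem.Chars.isdigit c = true
    · -- digit: cleaned gains c, a non-delimiter, prepended to the first run
      simp only [pvALoop, hd, if_true, pvCleanB, List.cons_append, List.nil_append]
      rw [pvSplitChar]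
      rw [pvIsdigit_ne_delim c hd]
      simp only [Bool.false_eq_true, if_false]
      have hne := pvSplitChar_ne_nil '\x00' (rest.flatMap pvCleanB)
      cases hsp : pvSplitChar '\x00' (rest.flatMap pvCleanB) with
      | nil => exact absurd hsp hne
      | cons r rs =>
        rw [ih (cur + 1), hsp]
        simp only [List.length_cons]
        have h10 : (cur + 1 + ↑r.length == 10) = (cur + ↑(r.length + 1) == 10) := by
          push_cast; ring_nf
        have h11 : (cur + 1 + ↑r.length == 11) = (cur + ↑(r.length + 1) == 11) := by
          push_cast; ring_nf
        rw [h10, h11]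
    · by_cases hs : pvIsSepA c = true
      · -- separator: cleaned unchanged, counter unchanged
        simp only [pvALoop, hd, hs, pvCleanB, pvSep_eq]
        simp only [Bool.false_eq_true, if_false, if_true, List.nil_append]
        exact ih cur
      · -- other: cleaned gains the delimiter, starting a fresh (empty) first run
        simp only [pvALoop, hd, hs, pvCleanB, pvSep_eq]
        simp only [Bool.false_eq_true, if_false, List.cons_append, List.nil_append]
        rw [pvSplitChar]
        simp only [beq_self_eq_true, if_true]
        rw [ih 0]
        have hne := pvSplitChar_ne_nil '\x00' (rest.flatMap pvCleanB)
        cases hsp : pvSplitChar '\x00' (rest.flatMap pvCleanB) with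
        | nil => exact absurd hsp hne
        | cons r rs =>
          simp only [List.length_nil, Nat.cast_zero, add_zero, zero_add, List.any_cons]
          rw [pvOkCast]
          cases (cur == 10 || cur == 11) <;> simp [pvRunOk]

-- appending the trailing " " is the same as the plain loop's fall-through return
theorem pvALoop_append_space (l : List Char) : ∀ (cur : Int), pvALoop (l ++ [' ']) cur = pvALoop l cur := by
  induction l with
  | nil =>
    intro cur
    simp [pvALoop, pvIsSepA, PySem.Chars.isdigit]
  | cons c rest ih =>
    intro cur
    simp only [List.cons_append, pvALoop]
    split
    · exact ih _
    · split
      · exact ih _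
      · split
        · rfl
        · exact ih _

-- ===== VERDICT (by name: the statement is the Claim_ definition above) =====
theorem contains_phone_like_py_spec : Claim_equal_contains_phone_like_py := by
  intro text _
  unfold Spec_contains_phone_like_py contains_phone_like_py contains_phone_like_py_alt
  show pvALoop (text.toList ++ [' ']) 0 =
    (pvSplitChar '\x00' (text.toList.flatMap pvCleanB)).any pvRunOk
  rw [pvALoop_append_space, pvMain]
  have hne := pvSplitChar_ne_nil '\x00' (text.toList.flatMap pvCleanB)
  cases hsp : pvSplitChar '\x00' (text.toList.flatMap pvCleanB) with
  | nil => exact absurd hsp hne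
  | cons r rs =>
    simp only [List.any_cons, zero_add]
    congr 1
    simp only [pvRunOk]
    exact pvOkCast r.length
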